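-- pv_equiv track=rewrite | github.com/BaptSoulier/Monitoring | core/permission_manager.py | octal_to_symbolic
-- ===== SOURCE A (Python) =====
-- def octal_to_symbolic(mode):
--     """Convertit un mode octal (nombre) en représentation symbolique (chaîne).
--
--     Args:
--         mode (int): Le mode de fichier au format octal (e.g., 0o755).
--
--     Returns:
--         str: La représentation symbolique du mode (e.g., 'rwxr-xr-x').
--     """
--     # Convertit le mode octal en une chaîne de 4 chiffres (e.g., '0755')
--     mode_str = f"{mode:04o}"
--     # Ignore le premier chiffre (type de fichier) pour les permissions
--     mode_str = mode_str[1:]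
--
--     # Initialise la chaîne symbolique avec des tirets
--     symbolic = "---------";
--
--     # Définit les permissions pour chaque catégorie (propriétaire, groupe, autres)
--     for i in range(3):
--         octal_digit = int(mode_str[i])
--         if octal_digit & 4:  # Lecture
--             symbolic = symbolic[:i * 3] + 'r' + symbolic[i * 3 + 1:]
--         if octal_digit & 2:  # Écriture
--             symbolic = symbolic[:i * 3 + 1] + 'w' + symbolic[i * 3 + 2:]
--         if octal_digit & 1:  # Exécution
--             symbolic = symbolic[:i * 3 + 2] + 'x' + symbolic[i * 3 + 3:]
--     return symbolic
-- ===== SOURCE B (Python) =====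
-- _TABLE = ['---', '--x', '-w-', '-wx', 'r--', 'r-x', 'rw-', 'rwx']
--
-- def octal_to_symbolic(mode):
--     mode_str = f"{mode:04o}"[1:]
--     return ''.join(_TABLE[int(mode_str[i])] for i in range(3))
-- ===== Notes on version B (the rewrite author's own statement) =====
-- stated objective: simpler
-- what changed: Replaces the per-bit tests and repeated string slice-reassembly with a precomputed per-octal-digit lookup table of rwx triples joined once.
import Mathlib
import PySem

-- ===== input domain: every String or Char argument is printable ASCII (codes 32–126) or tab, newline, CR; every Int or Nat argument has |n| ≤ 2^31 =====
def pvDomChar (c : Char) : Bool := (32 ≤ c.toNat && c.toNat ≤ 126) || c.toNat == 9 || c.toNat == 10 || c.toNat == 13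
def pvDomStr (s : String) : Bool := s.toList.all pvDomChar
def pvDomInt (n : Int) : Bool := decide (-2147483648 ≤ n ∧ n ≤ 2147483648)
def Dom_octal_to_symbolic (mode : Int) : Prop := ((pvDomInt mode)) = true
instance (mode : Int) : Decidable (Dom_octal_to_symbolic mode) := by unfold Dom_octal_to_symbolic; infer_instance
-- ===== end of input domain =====

-- B replaces A's per-bit tests and string slice-reassembly with a precomputed
-- per-octal-digit lookup table of rwx triples joined once (objective: simpler).

-- ===== PORT A =====
-- shared helper: the digit string f"{mode:04o}"[1:], the identical expression in Source A and Source B.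
-- hand-written port of Python's '%04o' format (sign-aware zero padding), exact for all ints.
def pvDigitChar8 (d : Nat) : Char := Char.ofNat (48 + d)

def pvNatToOct (n : Nat) : List Char :=
  if n < 8 then [pvDigitChar8 n]
  else pvNatToOct (n / 8) ++ [pvDigitChar8 (n % 8)]
termination_by n
decreasing_by exact Nat.div_lt_self (by omega) (by omega)

def pvPadZero (w : Nat) (cs : List Char) : List Char :=
  List.replicate (w - cs.length) '0' ++ cs

def pvModeStr (mode : Int) : List Char :=
  let s := pvNatToOct mode.natAbs
  let full := if mode < 0 then '-' :: pvPadZero 3 s else pvPadZero 4 s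
  full.drop 1

-- the body of A's for-loop: the three bit-test slice reassignments for digit d at index i
def pvStep (d i : Nat) (sym : List Char) : List Char :=
  let sym := if d &&& 4 ≠ 0 then sym.take (i * 3) ++ 'r' :: sym.drop (i * 3 + 1) else sym
  let sym := if d &&& 2 ≠ 0 then sym.take (i * 3 + 1) ++ 'w' :: sym.drop (i * 3 + 2) else sym
  if d &&& 1 ≠ 0 then sym.take (i * 3 + 2) ++ 'x' :: sym.drop (i * 3 + 3) else sym

-- A: start from '---------' and, per digit, set 'r'/'w'/'x' by bit tests via slicing.
-- mode_str[i] is always in range (length ≥ 3), so getD never takes its default.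
def octal_to_symbolic (mode : Int) : String :=
  let mode_str := pvModeStr mode
  let symbolic := ("---------").toList
  String.mk ((List.range 3).foldl
    (fun sym i => pvStep ((mode_str.getD i '0').toNat - 48) i sym) symbolic)

-- ===== PORT B =====
def pvTABLE : List String := ["---", "--x", "-w-", "-wx", "r--", "r-x", "rw-", "rwx"]

def octal_to_symbolic_alt (mode : Int) : String :=
  let mode_str := pvModeStr mode
  String.join ((List.range 3).map (fun i => pvTABLE.getD ((mode_str.getD i '0').toNat - 48) ""))

-- ===== PRECONDITION & SPEC =====
def Spec_octal_to_symbolic (mode : Int) (out : String) : Prop := out = octal_to_symbolic_alt mode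
instance (mode : Int) (out : String) : Decidable (Spec_octal_to_symbolic mode out) := by unfold Spec_octal_to_symbolic; infer_instance

-- ===== CLAIM (what is proved, stated in full; the proofs are below) =====
def Claim_equal_octal_to_symbolic : Prop := ∀ (mode : Int), Dom_octal_to_symbolic mode → Spec_octal_to_symbolic mode (octal_to_symbolic mode)

-- ===== LEMMAS AND PROOFS =====

theorem pvDigitChar8_lt : ∀ d < 8, (pvDigitChar8 d).toNat - 48 < 8 := by decide

-- every char produced by pvNatToOct is an octal digit char
theorem pvNatToOct_digits (n : Nat) : ∀ c ∈ pvNatToOct n, c.toNat - 48 < 8 := by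
  induction n using Nat.strong_induction_on with
  | _ n ih =>
    intro c hc
    rw [pvNatToOct] at hc
    split at hc
    · simp at hc; subst hc
      exact pvDigitChar8_lt n (by omega)
    · rename_i h
      simp at hc
      rcases hc with hc | hc
      · exact ih (n / 8) (Nat.div_lt_self (by omega) (by omega)) c hc
      · subst hc
        exact pvDigitChar8_lt (n % 8) (Nat.mod_lt _ (by omega))

theorem pvModeStr_digits (mode : Int) : ∀ c ∈ pvModeStr mode, c.toNat - 48 < 8 := by
  intro c hc
  unfold pvModeStr at hc
  have base : ∀ w, c ∈ pvPadZero w (pvNatToOct mode.natAbs) → c.toNat - 48 < 8 := by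
    intro w hw
    unfold pvPadZero at hw
    rcases List.mem_append.mp hw with h | h
    · have := List.eq_of_mem_replicate h; subst this; decide
    · exact pvNatToOct_digits _ c h
  split at hc
  · simp only [List.drop_succ_cons, List.drop_zero] at hc
    exact base 3 hc
  · exact base 4 (List.mem_of_mem_drop hc)

-- A's three loop steps and B's three table triples agree for octal digits
theorem pv_key : ∀ d0 < 8, ∀ d1 < 8, ∀ d2 < 8,
    String.mk (pvStep d2 2 (pvStep d1 1 (pvStep d0 0 ("---------").toList)))
      = String.join [pvTABLE.getD d0 "", pvTABLE.getD d1 "", pvTABLE.getD d2 ""] := by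
  decide

-- core: both bodies agree on any digit list of length ≥ 3 whose chars are octal digits
theorem pv_core (cs : List Char)
    (hd : ∀ c ∈ cs, c.toNat - 48 < 8) :
    String.mk ((List.range 3).foldl
        (fun sym i => pvStep ((cs.getD i '0').toNat - 48) i sym) (("---------").toList))
    = String.join ((List.range 3).map (fun i => pvTABLE.getD ((cs.getD i '0').toNat - 48) "")) := by
  have hget : ∀ i : Nat, (cs.getD i '0').toNat - 48 < 8 := by
    intro i
    rw [List.getD_eq_getElem?_getD]
    cases h : cs[i]? with
    | none => decide
    | some c => exact hd c (List.mem_of_getElem? h)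
  simp only [show List.range 3 = [0, 1, 2] from rfl, List.foldl, List.map]
  exact pv_key _ (hget 0) _ (hget 1) _ (hget 2)

-- ===== VERDICT (by name: the statement is the Claim_ definition above) =====
theorem octal_to_symbolic_spec : Claim_equal_octal_to_symbolic := by
  intro mode _
  unfold Spec_octal_to_symbolic octal_to_symbolic octal_to_symbolic_alt
  exact pv_core (pvModeStr mode) (pvModeStr_digits mode)
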